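-- pv_equiv track=rewrite | github.com/soras/EstTimexCorpora | scripts/tml_conv_utils.py | extract_tags_from_position
-- ===== SOURCE A (Python) =====
-- def extract_tags_from_position( content, pos ):
--     '''Extract all (consecutive) tags from the given position
--        in the content string. Returns a list of extracted tags,
--        and the last position in the (last) ending tag. '''
--     tags = []
--     symbol = content[pos]
--     if symbol == '<':
--         # Extract tags
--         cur_tag = []
--         while pos < len(content):
--             symbol = content[pos]
--             cur_tag.append( symbol )
--             if symbol == '>':
--                 tags.append( ''.join(cur_tag) )
--                 # chk for consecutive tags:
--                 # check if the next symbol is a tag start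
--                 if pos + 1 < len(content) and \
--                    content[pos + 1] == '<':
--                     # start collecting next tag
--                     cur_tag = []
--                 else:
--                     break
--             pos += 1
--     return tags, pos
-- ===== SOURCE B (Python) =====
-- def extract_tags_from_position(content, pos):
--     '''Extract all (consecutive) tags from the given position
--        in the content string. Returns a list of extracted tags,
--        and the last position in the (last) ending tag. '''
--     if content[pos] != '<':
--         return [], pos
--     n = len(content)
--     if pos < 0:
--         pos += n  # normalize a negative index
--     tags = []
--     while True:
--         end = content.find('>', pos)
--         if end == -1:
--             return tags, n
--         tags.append(content[pos:end + 1])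
--         if end + 1 < n and content[end + 1] == '<':
--             pos = end + 1
--         else:
--             return tags, end
-- ===== Notes on version B (the rewrite author's own statement) =====
-- stated objective: idiomatic
-- what changed: Replaces the per-character while-loop with current-tag accumulator by jumps with str.find('>', pos) and slicing out each whole tag, normalizing a negative start index once.
-- intended difference: For a negative in-range pos where content[pos]=='<' and content contains '>', A's scan wraps past index -1 back to index 0 and re-reads the start of the string (e.g. A('<a>',-3) = (['<a>','<a>'], 2)); B scans the suffix once and returns (['<a>'], 2), the intended tags starting at that position. — e.g. on extract_tags_from_position("<a>", -3): A returns (["<a>", "<a>"], 2), B returns (["<a>"], 2)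
import Mathlib
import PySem

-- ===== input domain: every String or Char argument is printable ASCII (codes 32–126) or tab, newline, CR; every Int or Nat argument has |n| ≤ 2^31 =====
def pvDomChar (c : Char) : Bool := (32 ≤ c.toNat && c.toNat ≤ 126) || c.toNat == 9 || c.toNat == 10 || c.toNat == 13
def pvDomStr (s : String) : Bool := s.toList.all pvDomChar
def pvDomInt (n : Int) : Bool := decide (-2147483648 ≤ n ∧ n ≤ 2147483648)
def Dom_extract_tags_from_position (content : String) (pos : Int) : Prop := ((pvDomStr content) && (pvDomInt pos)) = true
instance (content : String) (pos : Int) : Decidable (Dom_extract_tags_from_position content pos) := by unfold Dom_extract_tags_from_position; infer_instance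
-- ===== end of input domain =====

-- B replaces A's per-character while-loop (with a current-tag accumulator) by jumps with
-- content.find('>', pos) and slicing out each whole tag (idiomatic; return value only).

-- ===== PORT A =====
-- A's while-loop; fuel is a structural totality bound on the number of iterations
-- (pos grows by 1 each iteration until it reaches len(content)); the call site passes
-- (len(content) - pos) + 1, which is strictly more than the loop can perform.
def pvALoop (content : String) (fuel : Nat) (tags : List String) (cur : List Char)
    (pos : Int) : List String × Int :=
  match fuel with
  | 0 => (tags, pos)  -- unreachable: fuel strictly bounds the iteration count
  | fuel + 1 =>
    if pos < PySem.Str.len content then          -- while pos < len(content)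
      match PySem.Str.pyGet? content pos with    -- symbol = content[pos]
      | none => (tags, pos)                      -- IndexError: unreachable (Pre_ and pos only grows)
      | some symbol =>
        let cur := cur ++ [symbol]               -- cur_tag.append(symbol)
        if symbol = '>' then
          let tags := tags ++ [String.ofList cur]  -- tags.append(''.join(cur_tag))
          if pos + 1 < PySem.Str.len content ∧
             PySem.Str.pyGet? content (pos + 1) = some '<' then
            pvALoop content fuel tags [] (pos + 1)
          else (tags, pos)                       -- break
        else pvALoop content fuel tags cur (pos + 1)
    else (tags, pos)

def extract_tags_from_position (content : String) (pos : Int) : List String × Int :=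
  match PySem.Str.pyGet? content pos with        -- symbol = content[pos]
  | none => ([], pos)                            -- IndexError: excluded by Pre_
  | some symbol =>
    if symbol = '<' then
      pvALoop content ((PySem.Str.len content - pos).toNat + 1) [] [] pos
    else ([], pos)

-- ===== PORT B =====
-- B's while-True loop; fuel is a structural totality bound (the scan position grows by
-- at least 1 per iteration and stays below len(content)); the call site passes len + 1.
def pvBLoop (content : String) (fuel : Nat) (tags : List String) (pos : Nat) :
    List String × Int :=
  match fuel with
  | 0 => (tags, (pos : Int))  -- unreachable: fuel strictly bounds the iteration count
  | fuel + 1 =>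
    let e := PySem.Str.findFrom content ">" (pos : Int) none  -- end = content.find('>', pos)
    if e = -1 then (tags, PySem.Str.len content)
    else
      let tags := tags ++ [PySem.Str.slice content (some (pos : Int)) (some (e + 1))]
      if e + 1 < PySem.Str.len content ∧ PySem.Str.pyGet? content (e + 1) = some '<' then
        pvBLoop content fuel tags (e.toNat + 1)
      else (tags, e)

def extract_tags_from_position_alt (content : String) (pos : Int) : List String × Int :=
  match PySem.Str.pyGet? content pos with        -- content[pos]
  | none => ([], pos)                            -- IndexError: excluded by Pre_
  | some c =>
    if c ≠ '<' then ([], pos)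
    else
      let n := PySem.Str.len content
      let p := if pos < 0 then pos + n else pos  -- normalize a negative index
      pvBLoop content (n.toNat + 1) [] p.toNat

-- ===== PRECONDITION & SPEC =====
-- Pre_ excludes exactly the out-of-range positions, on which content[pos] raises IndexError.
def Pre_extract_tags_from_position (content : String) (pos : Int) : Prop :=
  -(PySem.Str.len content) ≤ pos ∧ pos < PySem.Str.len content
instance (content : String) (pos : Int) : Decidable (Pre_extract_tags_from_position content pos) := by
  unfold Pre_extract_tags_from_position; infer_instance
def pvWitness_extract_tags_from_position : String × Int := ("<a><b>", 0)

-- For a negative in-range pos with content[pos] == '<' and '>' somewhere in content, A's scan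
-- wraps past index -1 back to index 0 and re-reads the start of the string; B scans the suffix
-- once and returns only the tags starting at that position, which is the intended value.
def D_extract_tags_from_position (content : String) (pos : Int) : Prop :=
  pos < 0 ∧ PySem.Str.pyGet? content pos = some '<' ∧ PySem.Str.isIn ">" content = true
instance (content : String) (pos : Int) : Decidable (D_extract_tags_from_position content pos) := by
  unfold D_extract_tags_from_position; infer_instance

def Spec_extract_tags_from_position (content : String) (pos : Int) (out : List String × Int) : Prop :=
  ¬ D_extract_tags_from_position content pos → out = extract_tags_from_position_alt content pos
instance (content : String) (pos : Int) (out : List String × Int) : Decidable (Spec_extract_tags_from_position content pos out) := by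
  unfold Spec_extract_tags_from_position; infer_instance

def pvDiffWitness_extract_tags_from_position : String × Int := ("<a>", -3)
def pvDiffWitnessOut_extract_tags_from_position : (List String × Int) × (List String × Int) :=
  ((["<a>", "<a>"], 2), (["<a>"], 2))

-- ===== CLAIM (what is proved, stated in full; the proofs are below) =====
def Claim_unchanged_extract_tags_from_position : Prop := ∀ (content : String) (pos : Int), Dom_extract_tags_from_position content pos → Pre_extract_tags_from_position content pos → Spec_extract_tags_from_position content pos (extract_tags_from_position content pos)
def Claim_changed_extract_tags_from_position : Prop := Dom_extract_tags_from_position (pvDiffWitness_extract_tags_from_position.1) (pvDiffWitness_extract_tags_from_position.2) ∧ Pre_extract_tags_from_position (pvDiffWitness_extract_tags_from_position.1) (pvDiffWitness_extract_tags_from_position.2) ∧ D_extract_tags_from_position (pvDiffWitness_extract_tags_from_position.1) (pvDiffWitness_extract_tags_from_position.2) ∧ extract_tags_from_position (pvDiffWitness_extract_tags_from_position.1) (pvDiffWitness_extract_tags_from_position.2) = pvDiffWitnessOut_extract_tags_from_position.1 ∧ extract_tags_from_position_alt (pvDiffWitness_extract_tags_from_position.1) (pvDiffWitness_extract_tags_from_position.2)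 = pvDiffWitnessOut_extract_tags_from_position.2 ∧ pvDiffWitnessOut_extract_tags_from_position.1 ≠ pvDiffWitnessOut_extract_tags_from_position.2

def Claim_exact_extract_tags_from_position : Prop := ∀ (content : String) (pos : Int), Dom_extract_tags_from_position content pos → Pre_extract_tags_from_position content pos → D_extract_tags_from_position content pos → extract_tags_from_position content pos ≠ extract_tags_from_position_alt content pos

-- ===== LEMMAS AND PROOFS =====

theorem pv_singleton_prefix_iff (c : Char) (t : List Char) : [c] <+: t ↔ t.head? = some c := by
  cases t with
  | nil => simp
  | cons a t => simp [List.cons_prefix_cons, eq_comm]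

theorem pv_singleton_infix_iff (c : Char) (l : List Char) : [c] <:+: l ↔ c ∈ l := by
  constructor
  · intro h; exact h.sublist.subset (List.mem_singleton_self c)
  · intro h
    obtain ⟨s, t, rfl⟩ := List.append_of_mem h
    exact ⟨s, t, by simp⟩

-- first-occurrence specification of findFrom for '>' at a natural start position
theorem pv_fg_spec (l : List Char) (p : Nat) (hp : p ≤ l.length) :
    (PySem.Chars.findFrom l ['>'] (p : Int) none = -1 ∧
      ∀ j : Nat, p ≤ j → l[j]? ≠ some '>') ∨
    (∃ e : Nat, PySem.Chars.findFrom l ['>'] (p : Int) none = (e : Int) ∧ p ≤ e ∧ e < l.length ∧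
      l[e]? = some '>' ∧ ∀ j : Nat, p ≤ j → j < e → l[j]? ≠ some '>') := by
  by_cases hF : PySem.Chars.findFrom l ['>'] (p : Int) none = -1
  · left
    refine ⟨hF, ?_⟩
    intro j hj hget
    rw [PySem.Chars.findFrom_natCast_eq_neg_one_iff l ['>'] p hp] at hF
    apply hF
    have hpre : ['>'] <+: l.drop j := by
      rw [pv_singleton_prefix_iff, List.head?_drop]; exact hget
    have hsuf : l.drop j <:+ l.drop p := by
      have : l.drop j = (l.drop p).drop (j - p) := by
        rw [List.drop_drop]; congr 1; omega
      rw [this]; exact List.drop_suffix _ _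
    exact hpre.isInfix.trans hsuf.isInfix
  · right
    obtain ⟨hle, hpre, hmin⟩ := PySem.Chars.findFrom_natCast_spec l ['>'] p hp hF
    set F := PySem.Chars.findFrom l ['>'] (p : Int) none with hFdef
    have h0 : (0:Int) ≤ F := le_trans (by exact_mod_cast Nat.zero_le p) hle
    refine ⟨F.toNat, (Int.toNat_of_nonneg h0).symm, by omega, ?_, ?_, ?_⟩
    · by_contra hlen
      rw [pv_singleton_prefix_iff, List.head?_drop] at hpre
      rw [List.getElem?_eq_none (by omega)] at hpre
      simp at hpre
    · rw [pv_singleton_prefix_iff, List.head?_drop] at hpre; exact hpre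
    · intro j hj hjlt hget
      apply hmin j hj hjlt
      rw [pv_singleton_prefix_iff, List.head?_drop]; exact hget

theorem pv_fg_here (l : List Char) (p : Nat) (hp : p < l.length) (h : l[p]? = some '>') :
    PySem.Chars.findFrom l ['>'] (p : Int) none = (p : Int) := by
  rcases pv_fg_spec l p (le_of_lt hp) with ⟨_, hall⟩ | ⟨e, hF, hpe, _, _, hmin⟩
  · exact absurd h (hall p le_rfl)
  · have : e = p := by
      by_contra hne
      exact hmin p le_rfl (by omega) h
    rw [hF, this]

theorem pv_fg_step (l : List Char) (p : Nat) (c : Char) (hp : p < l.length)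
    (h : l[p]? = some c) (hc : c ≠ '>') :
    PySem.Chars.findFrom l ['>'] (p : Int) none =
      PySem.Chars.findFrom l ['>'] ((p + 1 : Nat) : Int) none := by
  have hnp : l[p]? ≠ some '>' := by rw [h]; intro hx; exact hc (Option.some.inj hx)
  rcases pv_fg_spec l p (le_of_lt hp) with ⟨hF1, hall1⟩ | ⟨e1, hF1, hpe1, he1, hget1, hmin1⟩ <;>
    rcases pv_fg_spec l (p+1) (by omega) with ⟨hF2, hall2⟩ | ⟨e2, hF2, hpe2, he2, hget2, hmin2⟩
  · rw [hF1, hF2]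
  · exact absurd hget2 (hall1 e2 (by omega))
  · have he1p : e1 ≠ p := fun hx => hnp (hx ▸ hget1)
    exact absurd hget1 (hall2 e1 (by omega))
  · have he1p : e1 ≠ p := fun hx => hnp (hx ▸ hget1)
    have : e1 = e2 := by
      by_contra hne
      rcases Nat.lt_or_ge e1 e2 with hlt | hge
      · exact hmin2 e1 (by omega) hlt hget1
      · exact hmin1 e2 (by omega) (by omega) hget2
    rw [hF1, hF2, this]

-- the value of A's loop, phrased per extracted tag (proof-only view)
def pvAView (content : String) (k : Nat) (tags : List String) (cur : List Char) (p : Nat) :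
    List String × Int :=
  if PySem.Chars.findFrom content.toList ['>'] (p : Int) none = -1 then
    (tags, (content.toList.length : Int))
  else if ((PySem.Chars.findFrom content.toList ['>'] (p : Int) none).toNat : Int) + 1 <
            (content.toList.length : Int) ∧
          content.toList[(PySem.Chars.findFrom content.toList ['>'] (p : Int) none).toNat + 1]? =
            some '<' then
    pvALoop content
      (k - ((PySem.Chars.findFrom content.toList ['>'] (p : Int) none).toNat + 1 - p))
      (tags ++ [String.ofList (cur ++ (content.toList.drop p).take
        ((PySem.Chars.findFrom content.toList ['>'] (p : Int) none).toNat + 1 - p))]) []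
      (((PySem.Chars.findFrom content.toList ['>'] (p : Int) none).toNat : Int) + 1)
  else
    (tags ++ [String.ofList (cur ++ (content.toList.drop p).take
        ((PySem.Chars.findFrom content.toList ['>'] (p : Int) none).toNat + 1 - p))],
     ((PySem.Chars.findFrom content.toList ['>'] (p : Int) none).toNat : Int))

theorem pv_aloop_view (content : String) :
    ∀ (k p : Nat) (tags : List String) (cur : List Char),
      p ≤ content.toList.length → content.toList.length - p < k →
      pvALoop content k tags cur (p : Int) = pvAView content k tags cur p := by
  intro k
  induction k with
  | zero => intro p tags cur hp hk; omega
  | succ k ih =>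
    intro p tags cur hp hk
    by_cases hpn : p < content.toList.length
    · have hget : content.toList[p]? = some content.toList[p] := List.getElem?_eq_getElem hpn
      have hcast : (p : Int) + 1 = ((p + 1 : Nat) : Int) := by push_cast; ring
      simp only [pvALoop]
      rw [PySem.Str.len_eq, if_pos (by exact_mod_cast hpn)]
      simp only [PySem.Str.pyGet?_natCast]
      rw [hget]
      show (if content.toList[p] = '>' then
              if (p:Int) + 1 < (content.toList.length:Int) ∧
                 PySem.Str.pyGet? content ((p:Int) + 1) = some '<' then
                pvALoop content k (tags ++ [String.ofList (cur ++ [content.toList[p]])]) []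
                  ((p:Int) + 1)
              else (tags ++ [String.ofList (cur ++ [content.toList[p]])], (p:Int))
            else pvALoop content k tags (cur ++ [content.toList[p]]) ((p:Int) + 1)) =
        pvAView content (k+1) tags cur p
      by_cases hc : content.toList[p] = '>'
      · -- the character at p closes a tag
        have hFp := pv_fg_here content.toList p hpn (by rw [hget, hc])
        have htake : (content.toList.drop p).take (p + 1 - p) = ['>'] := by
          rw [List.drop_eq_getElem_cons hpn]
          have h1 : p + 1 - p = 1 := by omega
          rw [h1, List.take_succ_cons, List.take_zero, hc]
        have hfuel : k + 1 - (p + 1 - p) = k := by omega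
        rw [if_pos hc, hc, pvAView, hFp]
        conv_rhs => rw [if_neg (show ¬((p:Int) = -1) by omega)]
        simp only [Int.toNat_natCast]
        rw [htake, hfuel, hcast]
        simp only [PySem.Str.pyGet?_natCast]
      · -- ordinary character: step to p+1
        rw [if_neg hc]
        rw [hcast, ih (p+1) tags (cur ++ [content.toList[p]]) (by omega) (by omega)]
        have hs := pv_fg_step content.toList p content.toList[p] hpn hget hc
        rw [pvAView, pvAView, ← hs]
        by_cases hF : PySem.Chars.findFrom content.toList ['>'] (p : Int) none = -1
        · rw [if_pos hF, if_pos hF]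
        · rw [if_neg hF, if_neg hF]
          rcases pv_fg_spec content.toList p (le_of_lt hpn) with ⟨hF1, _⟩ |
            ⟨e, hFe, hpe, helen, hgete, _⟩
          · exact absurd hF1 hF
          · have hep : e ≠ p := by
              intro hx
              rw [hx, hget] at hgete
              exact hc (Option.some.inj hgete)
            rw [hFe, Int.toNat_natCast]
            have h1 : e + 1 - (p + 1) = e - p := by omega
            have h2 : e + 1 - p = (e - p) + 1 := by omega
            rw [h1, h2]
            have h3 : k - (e - p) = k + 1 - (e - p + 1) := by omega
            rw [h3]
            rw [List.drop_eq_getElem_cons hpn, List.take_succ_cons]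
            have htag : ∀ X : List Char,
                (cur ++ [content.toList[p]]) ++ X = cur ++ content.toList[p] :: X := by
              intro X; simp
            rw [htag]
    · -- p = length: the loop exits and the view returns (tags, len)
      have hpe : p = content.toList.length := by omega
      simp only [pvALoop]
      rw [PySem.Str.len_eq,
        if_neg (by exact_mod_cast (by omega : ¬ (p:Int) < (content.toList.length:Int)))]
      rw [pvAView, if_pos ?hneg]
      · rw [hpe]
      case hneg =>
        rw [PySem.Chars.findFrom_natCast_eq_neg_one_iff content.toList ['>'] p (by omega)]
        rw [hpe, List.drop_length]
        intro hinf
        have := hinf.sublist.length_le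
        simp at this

theorem pv_aloop_stepI (content : String) (a : Nat) (tags : List String) (cur : List Char)
    (p : Int) (c : Char) (hpn : p < PySem.Str.len content)
    (hc : PySem.Str.pyGet? content p = some c) :
    pvALoop content (a+1) tags cur p =
      if c = '>' then
        (if p + 1 < PySem.Str.len content ∧ PySem.Str.pyGet? content (p+1) = some '<'
         then pvALoop content a (tags ++ [String.ofList (cur ++ [c])]) [] (p+1)
         else (tags ++ [String.ofList (cur ++ [c])], p))
      else pvALoop content a tags (cur ++ [c]) (p+1) := by
  simp only [pvALoop]
  rw [if_pos hpn, hc]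

theorem pv_aloop_fuel_irrel (content : String) :
    ∀ (k1 k2 p : Nat) (tags : List String) (cur : List Char),
      p ≤ content.toList.length → content.toList.length - p < k1 →
      content.toList.length - p < k2 →
      pvALoop content k1 tags cur (p : Int) = pvALoop content k2 tags cur (p : Int) := by
  intro k1
  induction k1 using Nat.strong_induction_on with
  | _ k1 ih =>
    intro k2 p tags cur hp h1 h2
    obtain ⟨a, rfl⟩ : ∃ a, k1 = a + 1 := ⟨k1 - 1, by omega⟩
    obtain ⟨b, rfl⟩ : ∃ b, k2 = b + 1 := ⟨k2 - 1, by omega⟩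
    by_cases hpn : p < content.toList.length
    · have hget : content.toList[p]? = some content.toList[p] := List.getElem?_eq_getElem hpn
      have hcast : (p : Int) + 1 = ((p + 1 : Nat) : Int) := by push_cast; ring
      have hlt : (p : Int) < PySem.Str.len content := by
        rw [PySem.Str.len_eq]; exact_mod_cast hpn
      have hgetS : PySem.Str.pyGet? content (p : Int) = some content.toList[p] := by
        rw [PySem.Str.pyGet?_natCast]; exact hget
      rw [pv_aloop_stepI content a tags cur (p : Int) _ hlt hgetS,
          pv_aloop_stepI content b tags cur (p : Int) _ hlt hgetS]
      by_cases hcc : content.toList[p] = '>'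
      · rw [if_pos hcc, if_pos hcc]
        by_cases hcont : (p : Int) + 1 < PySem.Str.len content ∧
            PySem.Str.pyGet? content ((p : Int) + 1) = some '<'
        · rw [if_pos hcont, if_pos hcont, hcast]
          exact ih a (by omega) b (p+1) _ _ (by omega) (by omega) (by omega)
        · rw [if_neg hcont, if_neg hcont]
      · rw [if_neg hcc, if_neg hcc, hcast]
        exact ih a (by omega) b (p+1) _ _ (by omega) (by omega) (by omega)
    · have hblt : ¬((p : Int) < PySem.Str.len content) := by
        rw [PySem.Str.len_eq]; exact_mod_cast hpn
      simp only [pvALoop]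
      rw [if_neg hblt, if_neg hblt]

theorem pv_bloop_fuel_irrel (content : String) :
    ∀ (k1 k2 p : Nat) (tags : List String),
      p ≤ content.toList.length → content.toList.length - p < k1 →
      content.toList.length - p < k2 →
      pvBLoop content k1 tags p = pvBLoop content k2 tags p := by
  intro k1
  induction k1 using Nat.strong_induction_on with
  | _ k1 ih =>
    intro k2 p tags hp h1 h2
    obtain ⟨a, rfl⟩ : ∃ a, k1 = a + 1 := ⟨k1 - 1, by omega⟩
    obtain ⟨b, rfl⟩ : ∃ b, k2 = b + 1 := ⟨k2 - 1, by omega⟩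
    simp only [pvBLoop]
    have hbr : PySem.Str.findFrom content ">" (p : Int) none =
        PySem.Chars.findFrom content.toList ['>'] (p : Int) none := by
      rw [PySem.Str.findFrom_eq, show (">" : String).toList = ['>'] from by decide]
    by_cases hE : PySem.Str.findFrom content ">" (p : Int) none = -1
    · rw [if_pos hE, if_pos hE]
    · rw [if_neg hE, if_neg hE]
      rcases pv_fg_spec content.toList p hp with ⟨hF1, _⟩ | ⟨e, hFe, hpe, helen, _, _⟩
      · exact absurd (hbr.trans hF1) hE
      · by_cases hcont : PySem.Str.findFrom content ">" (p : Int) none + 1 <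
            PySem.Str.len content ∧
            PySem.Str.pyGet? content (PySem.Str.findFrom content ">" (p : Int) none + 1) =
              some '<'
        · rw [if_pos hcont, if_pos hcont]
          have hTn : (PySem.Str.findFrom content ">" (p : Int) none).toNat = e := by
            rw [hbr, hFe]; exact Int.toNat_natCast e
          rw [hTn]
          exact ih a (by omega) b (e+1) _ (by omega) (by omega) (by omega)
        · rw [if_neg hcont, if_neg hcont]

theorem pv_main (content : String) :
    ∀ (k p : Nat) (tags : List String),
      p ≤ content.toList.length → content.toList.length - p < k →
      pvALoop content k tags [] (p : Int) = pvBLoop content k tags p := by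
  intro k
  induction k using Nat.strong_induction_on with
  | _ k ih =>
    intro p tags hp hk
    obtain ⟨a, rfl⟩ : ∃ a, k = a + 1 := ⟨k - 1, by omega⟩
    rw [pv_aloop_view content (a+1) p tags [] hp hk]
    simp only [pvBLoop]
    have hbr : PySem.Str.findFrom content ">" (p : Int) none =
        PySem.Chars.findFrom content.toList ['>'] (p : Int) none := by
      rw [PySem.Str.findFrom_eq, show (">" : String).toList = ['>'] from by decide]
    rw [pvAView, hbr]
    by_cases hE : PySem.Chars.findFrom content.toList ['>'] (p : Int) none = -1
    · rw [if_pos hE, if_pos hE, PySem.Str.len_eq]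
    · rcases pv_fg_spec content.toList p hp with ⟨hF1, _⟩ | ⟨e, hFe, hpe, helen, _, _⟩
      · exact absurd hF1 hE
      · have hc1 : (e : Int) + 1 = ((e + 1 : Nat) : Int) := by push_cast; ring
        have hslice : PySem.Str.slice content (some (p : Int)) (some ((e + 1 : Nat) : Int)) =
            String.ofList ([] ++ (content.toList.drop p).take (e + 1 - p)) := by
          apply String.toList_inj.mp
          rw [PySem.Str.toList_slice, String.toList_ofList, PySem.Chars.slice_eq_listSlice]
          rw [PySem.List.slice_natCast]
          rw [List.nil_append]
        have hne : ¬((e : Int) = -1) := by omega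
        rw [hFe, if_neg hne, if_neg hne]
        simp only [Int.toNat_natCast]
        rw [PySem.Str.len_eq, hc1]
        simp only [PySem.Str.pyGet?_natCast]
        rw [hslice]
        by_cases hcond : (((e + 1 : Nat) : Int) < (content.toList.length : Int) ∧
            content.toList[e+1]? = some '<')
        · rw [if_pos hcond, if_pos hcond]
          have helt : e + 1 < content.toList.length := by exact_mod_cast hcond.1
          rw [pv_aloop_fuel_irrel content (a + 1 - (e + 1 - p)) a (e+1)
            (tags ++ [String.ofList ([] ++ (content.toList.drop p).take (e + 1 - p))]) []
            (by omega) (by omega) (by omega)]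
          exact ih a (by omega) (e+1) _ (by omega) (by omega)
        · rw [if_neg hcond, if_neg hcond]

theorem pv_neg_nogt (content : String) (hno : '>' ∉ content.toList) :
    ∀ (k : Nat) (p : Int) (tags : List String) (cur : List Char),
      -(content.toList.length : Int) ≤ p → p ≤ (content.toList.length : Int) →
      ((content.toList.length : Int) - p).toNat < k →
      pvALoop content k tags cur p = (tags, (content.toList.length : Int)) := by
  intro k
  induction k using Nat.strong_induction_on with
  | _ k ih =>
    intro p tags cur hlo hhi hk
    obtain ⟨a, rfl⟩ : ∃ a, k = a + 1 := ⟨k - 1, by omega⟩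
    by_cases hpn : p < (content.toList.length : Int)
    · obtain ⟨c, hc⟩ : ∃ c, PySem.Str.pyGet? content p = some c := by
        cases hx : PySem.Str.pyGet? content p with
        | none =>
          rw [PySem.Str.pyGet?_eq, PySem.Chars.pyGet?_eq_listPyGet?,
            PySem.List.pyGet?_eq_none_iff] at hx
          exact absurd ⟨hlo, hpn⟩ hx
        | some c => exact ⟨c, rfl⟩
      have hcl : c ∈ content.toList := by
        apply PySem.List.mem_of_pyGet?_eq_some content.toList
        rw [← PySem.Chars.pyGet?_eq_listPyGet?, ← PySem.Str.pyGet?_eq]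
        exact hc
      have hcne : c ≠ '>' := fun h => hno (h ▸ hcl)
      rw [pv_aloop_stepI content a tags cur p c (by rw [PySem.Str.len_eq]; exact hpn) hc]
      rw [if_neg hcne]
      exact ih a (by omega) (p+1) tags (cur ++ [c]) (by omega) (by omega) (by omega)
    · have hpeq : p = (content.toList.length : Int) := by omega
      simp only [pvALoop]
      rw [if_neg (by rw [PySem.Str.len_eq]; omega)]
      rw [hpeq]

-- ----- tightness: inside D_, A and B always differ -----

theorem pv_pyget_neg (content : String) (j : Nat) (hj : j < content.toList.length) :
    PySem.Str.pyGet? content ((j : Int) - (content.toList.length : Int)) =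
      content.toList[j]? := by
  rw [PySem.Str.pyGet?_eq, PySem.Chars.pyGet?_eq_listPyGet?]
  have h3 := PySem.List.pyGet?_neg_natCast content.toList (content.toList.length - j)
    (by omega) (by omega)
  have h2 : content.toList.length - (content.toList.length - j) = j := by omega
  rw [h2] at h3
  have h1 : (j : Int) - (content.toList.length : Int) =
      -(((content.toList.length - j : Nat)) : Int) := by omega
  rw [h1]
  exact h3

theorem pv_fst_prefix (content : String) :
    ∀ (fuel : Nat) (tags : List String) (cur : List Char) (pos : Int),
      tags <+: (pvALoop content fuel tags cur pos).fst := by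
  intro fuel
  induction fuel with
  | zero => intro tags cur pos; simp [pvALoop]
  | succ f ih =>
    intro tags cur pos
    simp only [pvALoop]
    split
    · split
      · simp
      · split_ifs with h1 h2
        · exact (List.prefix_append tags _).trans (ih _ _ _)
        · exact List.prefix_append tags _
        · exact ih _ _ _
    · simp

theorem pv_zero_appends (content : String) (hgt : '>' ∈ content.toList) :
    ∀ (fuel : Nat) (tags : List String) (cur : List Char),
      content.toList.length < fuel →
      tags.length < (pvALoop content fuel tags cur (0 : Int)).fst.length := by
  intro fuel tags cur hf
  rw [show (0 : Int) = ((0 : Nat) : Int) by simp]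
  rw [pv_aloop_view content fuel 0 tags cur (Nat.zero_le _) (by omega)]
  rw [pvAView]
  have hF : ¬ (PySem.Chars.findFrom content.toList ['>'] ((0 : Nat) : Int) none = -1) := by
    intro hE
    rcases pv_fg_spec content.toList 0 (Nat.zero_le _) with ⟨_, hall⟩ | ⟨e, hFe, _⟩
    · obtain ⟨i, hi, hieq⟩ := List.getElem_of_mem hgt
      exact hall i (Nat.zero_le i) (by rw [List.getElem?_eq_getElem hi, hieq])
    · rw [hFe] at hE; omega
  rw [if_neg hF]
  split_ifs with hcont
  · refine lt_of_lt_of_le ?_ (List.IsPrefix.length_le (pv_fst_prefix content _ _ _ _))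
    simp
  · simp

-- A's scan over a '>'-free stretch of negative positions
theorem pv_neg_run (content : String) :
    ∀ (d p0 fuel : Nat) (tags : List String) (cur : List Char),
      p0 + d ≤ content.toList.length →
      (∀ j : Nat, p0 ≤ j → j < p0 + d → content.toList[j]? ≠ some '>') →
      pvALoop content (fuel + d) tags cur ((p0 : Int) - (content.toList.length : Int)) =
        pvALoop content fuel tags (cur ++ (content.toList.drop p0).take d)
          (((p0 + d : Nat) : Int) - (content.toList.length : Int)) := by
  intro d
  induction d with
  | zero => intro p0 fuel tags cur hle hmin; simp
  | succ d ih =>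
    intro p0 fuel tags cur hle hmin
    have hp0 : p0 < content.toList.length := by omega
    have hget : content.toList[p0]? = some content.toList[p0] := List.getElem?_eq_getElem hp0
    have hcne : content.toList[p0] ≠ '>' := by
      intro h
      exact hmin p0 le_rfl (by omega) (by rw [hget, h])
    have hfe : fuel + (d + 1) = (fuel + d) + 1 := by omega
    rw [hfe, pv_aloop_stepI content (fuel + d) tags cur _ content.toList[p0]
      (by rw [PySem.Str.len_eq]; omega) (by rw [pv_pyget_neg content p0 hp0]; exact hget)]
    rw [if_neg hcne]
    have hpos : ((p0 : Int) - (content.toList.length : Int)) + 1 =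
        ((p0 + 1 : Nat) : Int) - (content.toList.length : Int) := by omega
    rw [hpos, ih (p0 + 1) fuel tags (cur ++ [content.toList[p0]]) (by omega)
      (fun j hj hjl => hmin j (by omega) (by omega))]
    have harr : (p0 + 1) + d = p0 + (d + 1) := by omega
    rw [harr]
    have hcur : (cur ++ [content.toList[p0]]) ++ (content.toList.drop (p0+1)).take d =
        cur ++ (content.toList.drop p0).take (d + 1) := by
      rw [List.drop_eq_getElem_cons hp0, List.take_succ_cons]
      simp
    rw [hcur]

-- starting anywhere in the negative regime (with a '>' somewhere in the string),
-- A's wrapped scan and B's suffix scan never return the same value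
theorem pv_neq (content : String) (hgt : '>' ∈ content.toList) :
    ∀ (m p0 fb : Nat) (tags : List String),
      content.toList.length - p0 = m → p0 < content.toList.length →
      content.toList.length - p0 ≤ fb →
      pvALoop content (content.toList.length + (content.toList.length - p0) + 1) tags []
          ((p0 : Int) - (content.toList.length : Int)) ≠
        pvBLoop content (fb + 1) tags p0 := by
  intro m
  induction m using Nat.strong_induction_on with
  | _ m ih =>
    intro p0 fb tags hm hp0 hfb
    have hbr : PySem.Str.findFrom content ">" (p0 : Int) none =
        PySem.Chars.findFrom content.toList ['>'] (p0 : Int) none := by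
      rw [PySem.Str.findFrom_eq, show (">" : String).toList = ['>'] from by decide]
    simp only [pvBLoop]
    rw [hbr]
    by_cases hE : PySem.Chars.findFrom content.toList ['>'] (p0 : Int) none = -1
    · -- no '>' at or after p0: B returns (tags, len) while A wraps and appends a tag
      rw [if_pos hE]
      rcases pv_fg_spec content.toList p0 (le_of_lt hp0) with ⟨_, hall⟩ | ⟨e, hFe, _⟩
      · have hfuel : content.toList.length + (content.toList.length - p0) + 1 =
            (content.toList.length + 1) + (content.toList.length - p0) := by omega
        rw [hfuel, pv_neg_run content (content.toList.length - p0) p0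
          (content.toList.length + 1) tags [] (by omega)
          (fun j hj hjl => hall j hj)]
        have hend : (((p0 + (content.toList.length - p0) : Nat) : Int) -
            (content.toList.length : Int)) = (0 : Int) := by omega
        rw [hend]
        intro heq
        have hlen := pv_zero_appends content hgt (content.toList.length + 1) tags
          ([] ++ (content.toList.drop p0).take (content.toList.length - p0)) (by omega)
        rw [heq] at hlen
        simp at hlen
      · rw [hFe] at hE; omega
    · -- first '>' at e0 ≥ p0
      rw [if_neg hE]
      rcases pv_fg_spec content.toList p0 (le_of_lt hp0) with ⟨hF1, _⟩ |
        ⟨e0, hFe, hpe, helen, hgete, hmin⟩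
      · exact absurd hF1 hE
      rw [hFe]
      simp only [Int.toNat_natCast]
      have hn1 : 1 ≤ content.toList.length := by omega
      -- run A up to the '>' at e0
      have hfuel : content.toList.length + (content.toList.length - p0) + 1 =
          (((content.toList.length + (content.toList.length - (e0 + 1)) + 1) + 1) +
            (e0 - p0)) := by omega
      rw [hfuel, pv_neg_run content (e0 - p0) p0 _ tags [] (by omega)
        (fun j hj hjl => hmin j hj (by omega))]
      have hpe0 : (((p0 + (e0 - p0) : Nat) : Int) - (content.toList.length : Int)) =
          ((e0 : Int) - (content.toList.length : Int)) := by omega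
      rw [hpe0]
      -- the '>' step
      rw [pv_aloop_stepI content _ _ _ _ '>'
        (by rw [PySem.Str.len_eq]; omega)
        (by rw [pv_pyget_neg content e0 helen]; exact hgete), if_pos rfl]
      have htagA : ([] ++ (content.toList.drop p0).take (e0 - p0)) ++ ['>'] =
          (content.toList.drop p0).take (e0 + 1 - p0) := by
        rw [List.nil_append]
        have h1 : e0 + 1 - p0 = (e0 - p0) + 1 := by omega
        rw [h1, List.take_add_one, List.getElem?_drop]
        have h2 : p0 + (e0 - p0) = e0 := by omega
        rw [h2, hgete]
        rfl
      rw [htagA]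
      have hsliceB : PySem.Str.slice content (some (p0 : Int)) (some ((e0 : Int) + 1)) =
          String.ofList ((content.toList.drop p0).take (e0 + 1 - p0)) := by
        apply String.toList_inj.mp
        rw [PySem.Str.toList_slice, String.toList_ofList, PySem.Chars.slice_eq_listSlice]
        rw [show (e0 : Int) + 1 = ((e0 + 1 : Nat) : Int) by omega, PySem.List.slice_natCast]
      rw [hsliceB]
      have hA1 : ((e0 : Int) - (content.toList.length : Int)) + 1 <
          PySem.Str.len content := by rw [PySem.Str.len_eq]; omega
      by_cases hlast : e0 + 1 < content.toList.length
      · -- the character after the '>' exists on both scans and is the same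
        have hgA2 : PySem.Str.pyGet? content (((e0 : Int) -
            (content.toList.length : Int)) + 1) = content.toList[e0+1]? := by
          rw [show ((e0 : Int) - (content.toList.length : Int)) + 1 =
            ((e0 + 1 : Nat) : Int) - (content.toList.length : Int) by omega]
          exact pv_pyget_neg content (e0+1) hlast
        have hgB2 : PySem.Str.pyGet? content ((e0 : Int) + 1) = content.toList[e0+1]? := by
          rw [show (e0 : Int) + 1 = ((e0 + 1 : Nat) : Int) by omega,
            PySem.Str.pyGet?_natCast]
        by_cases hlt : content.toList[e0+1]? = some '<'
        · have hcA : ((e0 : Int) - (content.toList.length : Int)) + 1 < PySem.Str.len content ∧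
              PySem.Str.pyGet? content (((e0 : Int) - (content.toList.length : Int)) + 1) =
                some '<' := ⟨hA1, by rw [hgA2]; exact hlt⟩
          have hcB : (e0 : Int) + 1 < PySem.Str.len content ∧
              PySem.Str.pyGet? content ((e0 : Int) + 1) = some '<' :=
            ⟨by rw [PySem.Str.len_eq]; exact_mod_cast hlast, by rw [hgB2]; exact hlt⟩
          rw [if_pos hcA, if_pos hcB]
          rw [show ((e0 : Int) - (content.toList.length : Int)) + 1 =
            ((e0 + 1 : Nat) : Int) - (content.toList.length : Int) by omega]
          obtain ⟨g, rfl⟩ : ∃ g, fb = g + 1 := ⟨fb - 1, by omega⟩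
          exact ih (content.toList.length - (e0 + 1)) (by omega) (e0 + 1) g _ rfl
            (by omega) (by omega)
        · have hnA : ¬(((e0 : Int) - (content.toList.length : Int)) + 1 < PySem.Str.len content ∧
              PySem.Str.pyGet? content (((e0 : Int) - (content.toList.length : Int)) + 1) =
                some '<') := fun h => hlt (hgA2 ▸ h.2)
          have hnB : ¬((e0 : Int) + 1 < PySem.Str.len content ∧
              PySem.Str.pyGet? content ((e0 : Int) + 1) = some '<') :=
            fun h => hlt (hgB2 ▸ h.2)
          rw [if_neg hnA, if_neg hnB]
          intro heq
          rw [Prod.mk.injEq] at heq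
          have hsnd := heq.2
          omega
      · -- the '>' is the last character: A wraps to index 0, B stops
        have he0n : e0 + 1 = content.toList.length := by omega
        have hnB : ¬((e0 : Int) + 1 < PySem.Str.len content ∧
            PySem.Str.pyGet? content ((e0 : Int) + 1) = some '<') := by
          rintro ⟨h1, -⟩
          rw [PySem.Str.len_eq] at h1
          omega
        rw [if_neg hnB]
        have hg0 : PySem.Str.pyGet? content (((e0 : Int) -
            (content.toList.length : Int)) + 1) = content.toList[0]? := by
          rw [show ((e0 : Int) - (content.toList.length : Int)) + 1 = (0 : Int) by omega]
          rw [show (0 : Int) = ((0 : Nat) : Int) by simp, PySem.Str.pyGet?_natCast]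
        by_cases h0 : content.toList[0]? = some '<'
        · have hcA : ((e0 : Int) - (content.toList.length : Int)) + 1 < PySem.Str.len content ∧
              PySem.Str.pyGet? content (((e0 : Int) - (content.toList.length : Int)) + 1) =
                some '<' := ⟨hA1, by rw [hg0]; exact h0⟩
          rw [if_pos hcA]
          rw [show ((e0 : Int) - (content.toList.length : Int)) + 1 = (0 : Int) by omega]
          intro heq
          have hlen := pv_zero_appends content hgt
            (content.toList.length + (content.toList.length - (e0 + 1)) + 1)
            (tags ++ [String.ofList ((content.toList.drop p0).take (e0 + 1 - p0))]) []
            (by omega)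
          rw [heq] at hlen
          simp at hlen
        · have hnA : ¬(((e0 : Int) - (content.toList.length : Int)) + 1 < PySem.Str.len content ∧
              PySem.Str.pyGet? content (((e0 : Int) - (content.toList.length : Int)) + 1) =
                some '<') := fun h => h0 (hg0 ▸ h.2)
          rw [if_neg hnA]
          intro heq
          rw [Prod.mk.injEq] at heq
          have hsnd := heq.2
          omega

-- ===== VERDICT (by name: the statement is the Claim_ definition above) =====
theorem extract_tags_from_position_spec : Claim_unchanged_extract_tags_from_position := by
  intro content pos hDom hPre hD
  obtain ⟨hlo, hhi⟩ := hPre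
  rw [PySem.Str.len_eq] at hlo hhi
  obtain ⟨c, hc⟩ : ∃ c, PySem.Str.pyGet? content pos = some c := by
    cases hx : PySem.Str.pyGet? content pos with
    | none =>
      rw [PySem.Str.pyGet?_eq, PySem.Chars.pyGet?_eq_listPyGet?,
        PySem.List.pyGet?_eq_none_iff] at hx
      exact absurd ⟨hlo, hhi⟩ hx
    | some c => exact ⟨c, rfl⟩
  simp only [extract_tags_from_position, extract_tags_from_position_alt, hc]
  by_cases hch : c = '<'
  · subst hch
    rw [if_pos rfl, if_neg (by simp)]
    by_cases hpos : 0 ≤ pos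
    · -- nonnegative start: the two loops compute the same tags
      have hpev : pos = ((pos.toNat : Nat) : Int) := (Int.toNat_of_nonneg hpos).symm
      rw [if_neg (by omega)]
      rw [PySem.Str.len_eq]
      rw [hpev]
      have hplt : pos.toNat < content.toList.length := by omega
      rw [pv_main content (((content.toList.length : Int) - ((pos.toNat : Nat) : Int)).toNat + 1)
        pos.toNat [] (by omega) (by omega)]
      rw [pv_bloop_fuel_irrel content
        (((content.toList.length : Int) - ((pos.toNat : Nat) : Int)).toNat + 1)
        ((content.toList.length : Int).toNat + 1) pos.toNat [] (by omega) (by omega) (by omega)]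
      simp only [Int.toNat_natCast]
    · -- negative start: ¬D_ means content has no '>' at all, both return ([], len)
      have hIn : PySem.Str.isIn ">" content ≠ true := fun h => hD ⟨by omega, hc, h⟩
      have hno : '>' ∉ content.toList := by
        intro hm
        apply hIn
        rw [PySem.Str.isIn_iff_infix, show (">" : String).toList = ['>'] from by decide,
          pv_singleton_infix_iff]
        exact hm
      rw [PySem.Str.len_eq]
      rw [pv_neg_nogt content hno (((content.toList.length : Int) - pos).toNat + 1) pos [] []
        (by omega) (by omega) (by omega)]
      rw [if_pos (by omega : pos < 0)]
      simp only [pvBLoop]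
      have hE : PySem.Str.findFrom content ">"
          (((pos + (content.toList.length : Int)).toNat : Nat) : Int) none = -1 := by
        rw [PySem.Str.findFrom_eq, show (">" : String).toList = ['>'] from by decide]
        rw [PySem.Chars.findFrom_natCast_eq_neg_one_iff content.toList ['>'] _ (by omega)]
        intro hinf
        exact hno (List.mem_of_mem_drop ((pv_singleton_infix_iff '>' _).mp hinf))
      rw [if_pos hE, PySem.Str.len_eq]
  · rw [if_neg hch, if_pos hch]

theorem extract_tags_from_position_changed : Claim_changed_extract_tags_from_position := by
  unfold Claim_changed_extract_tags_from_position; decide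

theorem extract_tags_from_position_tight : Claim_exact_extract_tags_from_position := by
  intro content pos hDom hPre hD
  obtain ⟨hneg, hget, hIn⟩ := hD
  obtain ⟨hlo, hhi⟩ := hPre
  rw [PySem.Str.len_eq] at hlo hhi
  have hgt : '>' ∈ content.toList := by
    rw [PySem.Str.isIn_iff_infix, show (">" : String).toList = ['>'] from by decide,
      pv_singleton_infix_iff] at hIn
    exact hIn
  obtain ⟨p0, hple, rfl⟩ : ∃ p0 : Nat, p0 < content.toList.length ∧
      pos = (p0 : Int) - (content.toList.length : Int) :=
    ⟨(pos + (content.toList.length : Int)).toNat, by omega, by omega⟩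
  simp only [extract_tags_from_position, extract_tags_from_position_alt, hget]
  rw [if_pos trivial, if_neg (show ¬(('<' : Char) ≠ '<') by simp)]
  rw [if_pos (show (p0 : Int) - (content.toList.length : Int) < 0 by omega)]
  rw [PySem.Str.len_eq]
  rw [show ((p0 : Int) - (content.toList.length : Int) +
    (content.toList.length : Int)).toNat = p0 by omega]
  rw [show ((content.toList.length : Int) -
    ((p0 : Int) - (content.toList.length : Int))).toNat + 1 =
    content.toList.length + (content.toList.length - p0) + 1 by omega]
  rw [show ((content.toList.length : Int)).toNat + 1 = content.toList.length + 1 by omega]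
  exact pv_neq content hgt (content.toList.length - p0) p0 content.toList.length []
    rfl hple (by omega)
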